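-- pv_equiv track=rewrite | github.com/TakeN96H/app | auto/Marines_starting.py | sercher
-- ===== SOURCE A (Python) =====
-- def sercher(ex_list):
--
--     #防御率 or 打率を消去する
--     del ex_list[0]
--     del ex_list[1]
--
--     #ピッチャーの名前を抽出
--     num_pit =[0]
--     for i in range(len(ex_list)):
--         try:
--             #防御率を抽出(登板なしの場合"-"なのでそれにも対応)
--             if(ex_list[i] != "-"):
--                 float(ex_list[i])
--             num_pit.append(i)
--         except Exception :{}
--
--
--     result_list =[]
--     for i in range(1,len(num_pit)):
--
--         #ひとつ前が4コ前=名前2列の場合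
--         if(num_pit[i-1] == num_pit[i] - 4):
--             select = num_pit[i] - 3
--             result_list.append(ex_list[select])
--         #ひとつ前が3コ前=名前1列の場合
--         if(num_pit[i-1] == num_pit[i] - 3):
--             select = num_pit[i] - 2
--             result_list.append(ex_list[select])
--
--     return result_list
-- ===== SOURCE B (Python) =====
-- def _numeric(val):
--     if val == "-":
--         return True
--     try:
--         float(val)
--         return True
--     except Exception:
--         return False
--
--
-- def sercher(ex_list):
--     # same in-place deletions as the original (observable mutation preserved)
--     del ex_list[0]
--     del ex_list[1]
--
--     # Single value-driven pass over ex_list[1:]: keep the length of the current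
--     # run of non-numeric fields and the first field of that run (the name).
--     # A numeric field closing a run of length 2 or 3 emits that name.
--     result_list = []
--     run_len = 0
--     name = ""
--     for val in ex_list[1:]:
--         if _numeric(val):
--             if run_len == 2 or run_len == 3:
--                 result_list.append(name)
--             run_len = 0
--         else:
--             if run_len == 0:
--                 name = val
--             run_len += 1
--     return result_list
-- ===== Notes on version B (the rewrite author's own statement) =====
-- stated objective: simpler
-- what changed: B drops A's two staged passes (build the num_pit index list seeded with 0, then scan consecutive index pairs and index back into ex_list) for one value-driven pass over ex_list[1:] that keeps only the length of the current run of non-numeric fields and its first field, emitting that field when a numeric field closes a run of length 2 or 3; no index arithmetic or intermediate list remains.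
import Mathlib
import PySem

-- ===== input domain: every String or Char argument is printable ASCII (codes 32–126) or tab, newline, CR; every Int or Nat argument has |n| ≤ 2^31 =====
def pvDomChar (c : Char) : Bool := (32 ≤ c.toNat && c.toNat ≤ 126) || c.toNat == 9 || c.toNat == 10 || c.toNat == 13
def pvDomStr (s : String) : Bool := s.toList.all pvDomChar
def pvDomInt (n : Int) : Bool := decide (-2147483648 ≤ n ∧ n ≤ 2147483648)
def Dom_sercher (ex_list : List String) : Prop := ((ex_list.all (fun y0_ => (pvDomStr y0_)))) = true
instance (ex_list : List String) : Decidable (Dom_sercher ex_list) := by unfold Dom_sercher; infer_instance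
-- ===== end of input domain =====

-- B replaces A's two index-based passes (build the num_pit index list, then scan index
-- pairs with list indexing) by one value-driven pass carrying only the current run of
-- non-numeric fields: simpler, no index arithmetic. Both Pythons mutate ex_list
-- identically (two dels); the theorems below are about the return value.

-- ===== PORT A =====
-- Acceptance test of Python's float(s) on ASCII input, hand-ported step for step from
-- CPython's float grammar (sign? (inf|infinity|nan | digitpart ['.' digitpart?] | '.' digitpart) exp?,
-- single '_' between digits, surrounding whitespace stripped); exact on the ASCII domain
-- (validated against CPython on random printable-ASCII strings).
def pyDchain : List Char → List Char
  | '_' :: c :: r => if c.isDigit then pyDchain r else '_' :: c :: r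
  | c :: r => if c.isDigit then pyDchain r else c :: r
  | [] => []

def pyDigitpart? : List Char → Option (List Char)
  | c :: r => if c.isDigit then some (pyDchain r) else none
  | [] => none

def pyExpon : List Char → Option (List Char)
  | c :: r =>
    if c = 'e' ∨ c = 'E' then
      match r with
      | s :: r2 => if s = '+' ∨ s = '-' then pyDigitpart? r2 else pyDigitpart? (s :: r2)
      | [] => none
    else some (c :: r)
  | [] => some []

def pyNumberOk (cs : List Char) : Bool :=
  match pyDigitpart? cs with
  | some r =>
    let r1 := match r with
      | '.' :: r' => (match pyDigitpart? r' with | some r2 => r2 | none => r')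
      | _ => r
    (match pyExpon r1 with | some r2 => r2.isEmpty | none => false)
  | none =>
    match cs with
    | '.' :: r =>
      (match pyDigitpart? r with
       | some r1 => (match pyExpon r1 with | some r2 => r2.isEmpty | none => false)
       | none => false)
    | _ => false

def pyFloatOk (s : String) : Bool :=
  let cs := PySem.Chars.strip s.toList
  let cs2 := match cs with
    | c :: r => if c = '+' ∨ c = '-' then r else c :: r
    | [] => []
  let low := cs2.map Char.toLower
  low == "inf".toList || low == "infinity".toList || low == "nan".toList || pyNumberOk cs2

-- A's try-block: append i iff ex_list[i] == "-" or float(ex_list[i]) succeeds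
def numericTok (s : String) : Bool := if s = "-" then true else pyFloatOk s

-- the body of A's second loop (prevv = num_pit[i-1], cur = num_pit[i]):
-- 'select' is cur-3 resp. cur-2, the two appends in A's source order
def gA (l : List String) (res : List String) (prevv cur : Int) : List String :=
  let res1 := if prevv = cur - 4 then res ++ [PySem.List.pyGetD l (cur - 3) ""] else res
  if prevv = cur - 3 then res1 ++ [PySem.List.pyGetD l (cur - 2) ""] else res1

def sercher (ex_list : List String) : List String :=
  match ex_list with
  | _a :: b :: _c :: rest =>
    -- del ex_list[0]; del ex_list[1]
    let l := b :: rest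
    let num_pit : List Int :=
      (PySem.List.pyRange 0 (l.length : Int)).foldl
        (fun acc i => if numericTok (PySem.List.pyGetD l i "") then acc ++ [i] else acc) [0]
    (PySem.List.pyRange 1 (num_pit.length : Int)).foldl
      (fun res i => gA l res (PySem.List.pyGetD num_pit (i - 1) 0) (PySem.List.pyGetD num_pit i 0))
      []
  | _ => []  -- unreachable under Pre_sercher (Python raises IndexError on len < 3)

-- ===== PORT B =====
-- B's port of the float() acceptance used inside its try/except: the SAME float grammar
-- as above, recognised by a character-at-a-time finite automaton instead of A's
-- recursive-descent consumption (also validated against CPython on ASCII input;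
-- the two acceptors are proved equal in numB_eq_numericTok below).
inductive FSt
  | start | intg | intUs | dotNoInt | afterDot | frac | fracUs | exp0 | expSign | expD | expUs | dead
deriving DecidableEq, Repr

def fstep (st : FSt) (c : Char) : FSt :=
  match st with
  | .start    => if c.isDigit then .intg else if c = '.' then .dotNoInt else .dead
  | .intg     => if c.isDigit then .intg else if c = '_' then .intUs else
                 if c = '.' then .afterDot else if c = 'e' ∨ c = 'E' then .exp0 else .dead
  | .intUs    => if c.isDigit then .intg else .dead
  | .dotNoInt => if c.isDigit then .frac else .dead
  | .afterDot => if c.isDigit then .frac else if c = 'e' ∨ c = 'E' then .exp0 else .dead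
  | .frac     => if c.isDigit then .frac else if c = '_' then .fracUs else
                 if c = 'e' ∨ c = 'E' then .exp0 else .dead
  | .fracUs   => if c.isDigit then .frac else .dead
  | .exp0     => if c.isDigit then .expD else if c = '+' ∨ c = '-' then .expSign else .dead
  | .expSign  => if c.isDigit then .expD else .dead
  | .expD     => if c.isDigit then .expD else if c = '_' then .expUs else .dead
  | .expUs    => if c.isDigit then .expD else .dead
  | .dead     => .dead

def fAccept : FSt → Bool
  | .intg | .afterDot | .frac | .expD => true
  | _ => false

def dfaNum (cs : List Char) : Bool := fAccept (cs.foldl fstep .start)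

def numB (s : String) : Bool :=
  if s = "-" then true
  else
    match PySem.Chars.strip s.toList with
    | [] => false
    | c :: r =>
      let body := if c = '+' ∨ c = '-' then r else c :: r
      ([ "inf".toList, "infinity".toList, "nan".toList ].contains (body.map Char.toLower))
        || dfaNum body

-- B's loop body: state = (length of current non-numeric run, first field of that run, output)
def stepB (st : Nat × String × List String) (val : String) : Nat × String × List String :=
  if numB val then
    (0, st.2.1, if st.1 = 2 ∨ st.1 = 3 then st.2.2 ++ [st.2.1] else st.2.2)
  else
    (st.1 + 1, if st.1 = 0 then val else st.2.1, st.2.2)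

def sercher_alt (ex_list : List String) : List String :=
  match ex_list with
  | _a :: b :: _c :: rest =>
    -- del ex_list[0]; del ex_list[1]; then the single pass over ex_list[1:] = rest
    let _l := b :: rest
    (rest.foldl stepB (0, "", [])).2.2
  | _ => []

-- ===== PRECONDITION & SPEC =====
-- Pre_ excludes exactly the inputs with fewer than 3 elements, on which Python A's
-- second 'del' (or the first, on []) raises IndexError (B raises there too).
def Pre_sercher (ex_list : List String) : Prop := 3 ≤ ex_list.length
instance (ex_list : List String) : Decidable (Pre_sercher ex_list) := by unfold Pre_sercher; infer_instance
def pvWitness_sercher : List String := ["ERA", "Tanaka", "3.15", "Sato", "Aoki", "2.50"]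

def Spec_sercher (ex_list : List String) (out : List String) : Prop := out = sercher_alt ex_list
instance (ex_list : List String) (out : List String) : Decidable (Spec_sercher ex_list out) := by unfold Spec_sercher; infer_instance

-- ===== CLAIM (what is proved, stated in full; the proofs are below) =====
def Claim_equal_sercher : Prop := ∀ (ex_list : List String), Dom_sercher ex_list → Pre_sercher ex_list → Spec_sercher ex_list (sercher ex_list)

-- ===== LEMMAS AND PROOFS =====

-- ---- Part 1: the DFA acceptor equals A's recursive-descent acceptor ----

-- what A's code does after a successful integer digitpart
def postInt (rest : List Char) : Bool :=
  (match pyExpon (match rest with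
      | '.' :: r' => (match pyDigitpart? r' with | some r2 => r2 | none => r')
      | _ => rest) with
   | some r2 => r2.isEmpty | none => false)

def expOk (rest : List Char) : Bool :=
  match pyExpon rest with | some r2 => r2.isEmpty | none => false

lemma foldl_dead (cs : List Char) : cs.foldl fstep .dead = .dead := by
  induction cs with
  | nil => rfl
  | cons c r ih => simpa [fstep] using ih

lemma acc_expD (cs : List Char) : fAccept (cs.foldl fstep .expD) = (pyDchain cs).isEmpty := by
  fun_induction pyDchain cs with
  | case1 c r h ih => simpa [fstep, h] using ih
  | case2 c r h => simp [fstep, h, foldl_dead, fAccept]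
  | case3 c r h hd ih => simpa [fstep, hd] using ih
  | case4 c r h hd =>
    by_cases hc : c = '_'
    · subst hc
      cases r with
      | nil => decide
      | cons c2 r2 => exact (h c2 r2 rfl rfl).elim
    · simp [fstep, hd, hc, foldl_dead, fAccept]
  | case5 => decide

lemma acc_expSign (r : List Char) :
    fAccept (r.foldl fstep .expSign)
      = (match pyDigitpart? r with | some r2 => r2.isEmpty | none => false) := by
  cases r with
  | nil => decide
  | cons c r2 =>
    by_cases hd : c.isDigit
    · simp [fstep, hd, pyDigitpart?, acc_expD]
    · simp [fstep, hd, pyDigitpart?, foldl_dead, fAccept]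

lemma acc_exp0 (c : Char) (cs : List Char) (hc : c = 'e' ∨ c = 'E') :
    fAccept (cs.foldl fstep .exp0) = expOk (c :: cs) := by
  cases cs with
  | nil => simp [expOk, pyExpon, hc, fAccept]
  | cons s r2 =>
    by_cases hs : s = '+' ∨ s = '-'
    · have hd : s.isDigit = false := by rcases hs with h | h <;> subst h <;> decide
      simp [fstep, expOk, pyExpon, hc, hs, hd, acc_expSign]
    · by_cases hd : s.isDigit
      · simp [fstep, expOk, pyExpon, pyDigitpart?, hc, hs, hd, acc_expD]
      · simp [fstep, expOk, pyExpon, pyDigitpart?, hc, hs, hd, foldl_dead, fAccept]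

lemma acc_frac (cs : List Char) : fAccept (cs.foldl fstep .frac) = expOk (pyDchain cs) := by
  fun_induction pyDchain cs with
  | case1 c r h ih => simpa [fstep, h] using ih
  | case2 c r h => simp [fstep, h, foldl_dead, fAccept, expOk, pyExpon]
  | case3 c r h hd ih => simpa [fstep, hd] using ih
  | case4 c r h hd =>
    by_cases hc : c = '_'
    · subst hc
      cases r with
      | nil => decide
      | cons c2 r2 => exact (h c2 r2 rfl rfl).elim
    · by_cases he : c = 'e' ∨ c = 'E'
      · simpa [fstep, hd, hc, he] using acc_exp0 c r he
      · simp [fstep, hd, hc, he, foldl_dead, fAccept, expOk, pyExpon]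
  | case5 => decide

lemma acc_afterDot (cs : List Char) :
    fAccept (cs.foldl fstep .afterDot)
      = expOk (match pyDigitpart? cs with | some r => r | none => cs) := by
  cases cs with
  | nil => decide
  | cons c r =>
    by_cases hd : c.isDigit
    · simp [fstep, hd, pyDigitpart?, acc_frac]
    · by_cases he : c = 'e' ∨ c = 'E'
      · have hx := acc_exp0 c r he
        simp [fstep, hd, pyDigitpart?, he] at hx ⊢
        exact hx
      · simp [fstep, hd, he, pyDigitpart?, foldl_dead, fAccept, expOk, pyExpon]

lemma acc_int (cs : List Char) : fAccept (cs.foldl fstep .intg) = postInt (pyDchain cs) := by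
  fun_induction pyDchain cs with
  | case1 c r h ih => simpa [fstep, h] using ih
  | case2 c r h => simp [fstep, h, foldl_dead, fAccept, postInt, pyExpon]
  | case3 c r h hd ih => simpa [fstep, hd] using ih
  | case4 c r h hd =>
    by_cases hc : c = '_'
    · subst hc
      cases r with
      | nil => decide
      | cons c2 r2 => exact (h c2 r2 rfl rfl).elim
    · by_cases hp : c = '.'
      · subst hp
        simpa [fstep, hd, postInt, expOk] using acc_afterDot r
      · by_cases he : c = 'e' ∨ c = 'E'
        · simpa [fstep, hd, hc, hp, he, postInt, expOk] using acc_exp0 c r he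
        · simp [fstep, hd, hc, hp, he, foldl_dead, fAccept, postInt, pyExpon]
  | case5 => decide

lemma dfa_eq_pyNumberOk (cs : List Char) : dfaNum cs = pyNumberOk cs := by
  cases cs with
  | nil => decide
  | cons c r =>
    by_cases hd : c.isDigit
    · have hp : c ≠ '.' := by intro hh; subst hh; simp at hd
      simpa [dfaNum, fstep, hd, pyNumberOk, pyDigitpart?, hp, postInt] using acc_int r
    · by_cases hp : c = '.'
      · subst hp
        cases r with
        | nil => decide
        | cons s r2 =>
          by_cases hs : s.isDigit
          · simp [dfaNum, fstep, hs, pyNumberOk, pyDigitpart?, acc_frac, expOk]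
          · simp [dfaNum, fstep, hs, pyNumberOk, pyDigitpart?, foldl_dead, fAccept]
      · simp [dfaNum, fstep, hd, hp, pyNumberOk, pyDigitpart?, foldl_dead, fAccept]

lemma numB_eq_numericTok (s : String) : numB s = numericTok s := by
  unfold numB numericTok pyFloatOk
  by_cases hm : s = "-"
  · simp [hm]
  · simp only [hm, if_false]
    cases hcs : PySem.Chars.strip s.toList with
    | nil => simp [pyNumberOk, pyDigitpart?]
    | cons c r =>
      simp only [dfaNum]
      rw [show fAccept (List.foldl fstep FSt.start (if c = '+' ∨ c = '-' then r else c :: r))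
            = pyNumberOk (if c = '+' ∨ c = '-' then r else c :: r) from dfa_eq_pyNumberOk _]
      by_cases hsgn : c = '+' ∨ c = '-' <;>
        · simp only [hsgn, if_true, if_false, List.contains, List.elem_cons, List.elem_nil]
          cases h1 : ((c :: r).map Char.toLower == "inf".toList) <;>
            cases h2 : ((c :: r).map Char.toLower == "infinity".toList) <;>
              cases h3 : ((c :: r).map Char.toLower == "nan".toList) <;>
                cases h4 : (r.map Char.toLower == "inf".toList) <;>
                  cases h5 : (r.map Char.toLower == "infinity".toList) <;>
                    cases h6 : (r.map Char.toLower == "nan".toList) <;>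
                      simp_all [Bool.or_comm]

-- ---- Part 2: both loop structures compute the same pair-driven result ----

-- the common core: fold over the numeric indices, pairing each with its predecessor
def pairFold (l : List String) : Int → List Int → List String → List String
  | _, [], res => res
  | prev, x :: xs, res => pairFold l x xs (gA l res prev x)

lemma loop1_eq (l : List String) :
    (PySem.List.pyRange 0 (l.length : Int)).foldl
      (fun acc i => if numericTok (PySem.List.pyGetD l i "") then acc ++ [i] else acc) ([0] : List Int)
    = 0 :: ((List.range l.length).filter (fun k => numericTok (l.getD k ""))).map (fun k : Nat => (k : Int)) := by
  rw [PySem.List.pyRange_zero_natCast, List.foldl_map]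
  simp only [PySem.List.pyGetD_natCast]
  rw [PySem.List.foldl_append_if (fun k => numericTok (l.getD k "")) (fun k : Nat => (k : Int))]
  simp

lemma loop2_aux (l : List String) (np : List Int) :
    ∀ (m k : Nat) (res : List String), np.length - k = m → k < np.length →
      (PySem.List.pyRange ((k : Int) + 1) (np.length : Int)).foldl
        (fun res i => gA l res (PySem.List.pyGetD np (i - 1) 0) (PySem.List.pyGetD np i 0)) res
      = pairFold l (np.getD k 0) (np.drop (k + 1)) res := by
  intro m
  induction m with
  | zero => intro k res hm hk; omega
  | succ m ih =>
    intro k res hm hk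
    by_cases hk1 : k + 1 = np.length
    · have hempty : PySem.List.pyRange ((k : Int) + 1) (np.length : Int) = [] := by
        simp [PySem.List.pyRange]; omega
      rw [hempty]
      have hdr : np.drop (k + 1) = [] := by rw [hk1]; exact List.drop_length
      rw [hdr]
      rfl
    · have hlt : ((k : Int) + 1) < (np.length : Int) := by exact_mod_cast by omega
      rw [PySem.List.pyRange_one_cons hlt, List.foldl_cons]
      have e2 : ((k : Int) + 1) = ((k + 1 : Nat) : Int) := by push_cast; ring
      have e3 : ((k : Int) + 1 + 1) = ((k + 1 : Nat) : Int) + 1 := by push_cast; ring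
      rw [e3, ih (k + 1) _ (by omega) (by omega)]
      have hdrop : np.drop (k + 1) = np.getD (k + 1) 0 :: np.drop (k + 2) := by
        rw [List.getD_eq_getElem _ _ (by omega)]
        exact List.drop_eq_getElem_cons (by omega)
      rw [hdrop]
      show pairFold l (np.getD (k+1) 0) (np.drop (k+2)) _
         = pairFold l (np.getD k 0) (np.getD (k+1) 0 :: np.drop (k+2)) res
      rw [pairFold]
      congr 1
      have e4 : ((k + 1 : Nat) : Int) - 1 = (k : Int) := by push_cast; ring
      simp only [e2, e4, PySem.List.pyGetD_natCast]

lemma loop2_zero (l : List String) (np : List Int) (h : 0 < np.length) :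
    (PySem.List.pyRange 1 (np.length : Int)).foldl
      (fun res i => gA l res (PySem.List.pyGetD np (i - 1) 0) (PySem.List.pyGetD np i 0)) []
    = pairFold l (np.getD 0 0) (np.drop 1) [] := by
  have h2 := loop2_aux l np np.length 0 [] rfl h
  norm_num at h2
  simpa [List.getD, List.drop_one] using h2

-- B's single pass, run from position k with run state (k-1-p, nm), equals pairFold on
-- the numeric positions in [k, length)
lemma bfold_eq (l : List String) :
    ∀ (m k p : Nat) (nm : String) (res : List String),
      l.length - k = m → 1 ≤ k → k ≤ l.length → p + 1 ≤ k →
      (k - 1 - p = 0 ∨ nm = l.getD (p + 1) "") →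
      ((l.drop k).foldl stepB (k - 1 - p, nm, res)).2.2
      = pairFold l (p : Int)
          (((List.range' k (l.length - k)).filter (fun j => numB (l.getD j ""))).map (fun j : Nat => (j : Int))) res := by
  intro m
  induction m with
  | zero =>
    intro k p nm res hm h1 h2 hp hinv
    rw [List.drop_of_length_le (by omega), hm]
    simp [pairFold]
  | succ m ih =>
    intro k p nm res hm h1 h2 hp hinv
    have hk : k < l.length := by omega
    have hgd : l.getD k "" = l[k] := List.getD_eq_getElem _ _ hk
    have hrange : l.length - k = (l.length - (k + 1)) + 1 := by omega
    rw [List.drop_eq_getElem_cons hk, List.foldl_cons, hrange, List.range'_succ, List.filter_cons]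
    by_cases hnum : numB l[k]
    · have hstep : stepB (k - 1 - p, nm, res) l[k]
          = (0, nm, if k - 1 - p = 2 ∨ k - 1 - p = 3 then res ++ [nm] else res) := by
        simp [stepB, hnum]
      have hgA : gA l res (p : Int) (k : Int)
          = (if k - 1 - p = 2 ∨ k - 1 - p = 3 then res ++ [nm] else res) := by
        unfold gA
        by_cases h4 : k = p + 4
        · have hnm : nm = l.getD (p + 1) "" := hinv.resolve_left (by omega)
          have c1 : (p : Int) = (k : Int) - 4 := by omega
          have c2 : ¬((p : Int) = (k : Int) - 3) := by omega
          have e1 : ((k : Int) - 3) = ((p + 1 : Nat) : Int) := by omega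
          rw [if_pos c1, if_neg c2, e1, PySem.List.pyGetD_natCast, ← hnm,
            if_pos (Or.inr (by omega))]
        · by_cases h3 : k = p + 3
          · have hnm : nm = l.getD (p + 1) "" := hinv.resolve_left (by omega)
            have c1 : ¬((p : Int) = (k : Int) - 4) := by omega
            have c2 : (p : Int) = (k : Int) - 3 := by omega
            have e1 : ((k : Int) - 2) = ((p + 1 : Nat) : Int) := by omega
            rw [if_neg c1, if_pos c2, e1, PySem.List.pyGetD_natCast, ← hnm,
              if_pos (Or.inl (by omega))]
          · rw [if_neg (by omega : ¬((p : Int) = (k : Int) - 4)),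
              if_neg (by omega : ¬((p : Int) = (k : Int) - 3)),
              if_neg (by omega : ¬(k - 1 - p = 2 ∨ k - 1 - p = 3))]
      rw [if_pos (show numB (l.getD k "") = true by rw [hgd]; exact hnum), List.map_cons, hstep]
      show _ = pairFold l (k : Int) _ (gA l res (p : Int) (k : Int))
      rw [hgA]
      have := ih (k + 1) k nm (if k - 1 - p = 2 ∨ k - 1 - p = 3 then res ++ [nm] else res)
        (by omega) (by omega) (by omega) (by omega) (Or.inl (by omega))
      simpa using this
    · have hstep : stepB (k - 1 - p, nm, res) l[k]
          = ((k + 1) - 1 - p, (if k - 1 - p = 0 then l[k] else nm), res) := by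
        simp [stepB, hnum]
        omega
      rw [if_neg (show ¬ numB (l.getD k "") = true by rw [hgd]; exact hnum), hstep]
      exact ih (k + 1) p _ res (by omega) (by omega) (by omega) (by omega)
        (by
          by_cases hz : k - 1 - p = 0
          · right
            rw [if_pos hz]
            have : p + 1 = k := by omega
            rw [this, hgd]
          · right
            rw [if_neg hz]
            exact hinv.resolve_left hz)

-- ===== VERDICT (by name: the statement is the Claim_ definition above) =====
theorem sercher_spec : Claim_equal_sercher := by
  unfold Claim_equal_sercher
  intro ex_list _hdom hpre
  unfold Spec_sercher
  match ex_list with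
  | [] => simp [Pre_sercher] at hpre
  | [_] => simp [Pre_sercher] at hpre
  | [_, _] => simp [Pre_sercher] at hpre
  | a :: b :: c :: rest =>
    simp only [sercher, sercher_alt]
    rw [loop1_eq (b :: rest), loop2_zero (b :: rest) _ (by simp)]
    have hpred : (fun j : Nat => numB ((b :: rest).getD j ""))
        = (fun j => numericTok ((b :: rest).getD j "")) :=
      funext fun j => numB_eq_numericTok _
    have hB := bfold_eq (b :: rest) ((b :: rest).length - 1) 1 0 "" [] rfl (le_refl 1)
      (by simp) (le_refl 1) (Or.inl rfl)
    rw [hpred] at hB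
    norm_num at hB
    rw [hB]
    simp only [List.drop_succ_cons, List.drop_zero,
      List.getD_eq_getElem?_getD]
    have hsplit : List.range (b :: rest).length = 0 :: List.range' 1 rest.length := by
      rw [List.range_eq_range', List.length_cons, List.range'_succ]
    rw [hsplit, List.filter_cons]
    by_cases hz : numericTok (((b :: rest)[0]?).getD "")
    · rw [if_pos hz, List.map_cons]
      show pairFold (b :: rest) 0 ((0 : Int) :: _) [] = _
      rw [pairFold]
      norm_num [gA]
    · rw [if_neg hz]
      simp
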